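-- pv_equiv track=rewrite | github.com/spencerpogo/adventofcode | 2019/04.py | has_small_group
-- ===== SOURCE A (Python) =====
-- def has_small_group(s):
--     last = None
--     group_len = 1
--     for c in s:
--         if last is not None:
--             if c == last:
--                 group_len += 1
--             else:
--                 if group_len == 2:
--                     return True
--                 group_len = 1
--         last = c
--     if group_len == 2:
--         return True
--     return False
-- ===== SOURCE B (Python) =====
-- def has_small_group(s):
--     # Pad with a sentinel on both ends, then test every 4-char window (a, b, c, d):
--     # a run of length exactly 2 exists iff some adjacent equal pair (b, c) has
--     # different neighbours on both sides. No counting, no state machine.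
--     t = [None] + list(s) + [None]
--     return any(b == c and a != b and c != d
--                for a, b, c, d in zip(t, t[1:], t[2:], t[3:]))
-- ===== Notes on version B (the rewrite author's own statement) =====
-- stated objective: alternative
-- what changed: Replaces A's stateful run-length counter with early return by a stateless local test: pad the string with sentinels and check every 4-wide sliding window for an adjacent equal pair whose outer neighbours both differ.
import Mathlib
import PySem

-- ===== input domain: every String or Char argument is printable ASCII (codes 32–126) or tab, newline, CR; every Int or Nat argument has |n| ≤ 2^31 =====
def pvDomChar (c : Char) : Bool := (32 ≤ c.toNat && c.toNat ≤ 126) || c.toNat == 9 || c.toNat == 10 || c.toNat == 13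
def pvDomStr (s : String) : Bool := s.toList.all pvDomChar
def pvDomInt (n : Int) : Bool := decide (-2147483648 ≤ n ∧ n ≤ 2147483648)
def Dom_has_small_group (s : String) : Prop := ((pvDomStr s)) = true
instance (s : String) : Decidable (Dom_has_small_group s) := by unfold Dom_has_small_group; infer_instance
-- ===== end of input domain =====

-- B replaces A's stateful run-length counter (with early return) by a stateless local
-- test: pad the string with sentinels and check every 4-wide sliding window for an
-- adjacent equal pair whose outer neighbours both differ.

-- ===== PORT A =====
-- A's loop: state (last, group_len); 'return True' is modelled by returning true immediately.
def hasSmallGroupLoop (last : Option Char) (groupLen : Nat) : List Char → Bool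
  | [] => groupLen == 2
  | c :: cs =>
    match last with
    | none => hasSmallGroupLoop (some c) groupLen cs
    | some l =>
      if c == l then hasSmallGroupLoop (some c) (groupLen + 1) cs
      else if groupLen == 2 then true
      else hasSmallGroupLoop (some c) 1 cs

def has_small_group (s : String) : Bool := hasSmallGroupLoop none 1 s.toList

-- ===== PORT B =====
-- Python's zip over four lists (truncates at the shortest).
def zip4 {α : Type} : List α → List α → List α → List α → List (α × α × α × α)
  | a :: as, b :: bs, c :: cs, d :: ds => (a, b, c, d) :: zip4 as bs cs ds
  | _, _, _, _ => []

-- t = [None] + list(s) + [None]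
def padded (s : String) : List (Option Char) := none :: s.toList.map some ++ [none]

-- any(b == c and a != b and c != d for a, b, c, d in zip(t, t[1:], t[2:], t[3:]))
def has_small_group_alt (s : String) : Bool :=
  (zip4 (padded s) (PySem.List.slice (padded s) (some 1) none)
      (PySem.List.slice (padded s) (some 2) none)
      (PySem.List.slice (padded s) (some 3) none)).any
    (fun q => q.2.1 == q.2.2.1 && q.1 != q.2.1 && q.2.2.1 != q.2.2.2)

-- ===== PRECONDITION & SPEC =====
def Spec_has_small_group (s : String) (out : Bool) : Prop := out = has_small_group_alt s
instance (s : String) (out : Bool) : Decidable (Spec_has_small_group s out) := by unfold Spec_has_small_group; infer_instance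

-- ===== CLAIM (what is proved, stated in full; the proofs are below) =====
def Claim_equal_has_small_group : Prop := ∀ (s : String), Dom_has_small_group s → Spec_has_small_group s (has_small_group s)

-- ===== LEMMAS AND PROOFS =====

-- the leading run of c in c :: l: its length (≥ 1) and the remainder
def takeRun (c : Char) : List Char → Nat × List Char
  | [] => (1, [])
  | d :: ds => if d == c then let p := takeRun c ds; (p.1 + 1, p.2) else (1, d :: ds)

theorem takeRun_snd_length (c : Char) (l : List Char) : (takeRun c l).2.length ≤ l.length := by
  induction l with
  | nil => simp [takeRun]
  | cons d ds ih =>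
    simp only [takeRun]
    split
    · exact Nat.le_succ_of_le ih
    · simp

theorem takeRun_fst_pos (c : Char) (l : List Char) : 1 ≤ (takeRun c l).1 := by
  cases l with
  | nil => simp [takeRun]
  | cons d ds => simp only [takeRun]; split <;> simp

theorem takeRun_snd_head (c : Char) (l : List Char) : (takeRun c l).2.head? ≠ some c := by
  induction l with
  | nil => simp [takeRun]
  | cons d ds ih =>
    simp only [takeRun]
    split
    · exact ih
    · rename_i h; simpa using fun hdc => h (by simp [hdc])

-- lengths of the consecutive-equal runs of l
def runLens : List Char → List Nat
  | [] => []
  | c :: cs => (takeRun c cs).1 :: runLens (takeRun c cs).2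
termination_by l => l.length
decreasing_by exact Nat.lt_succ_of_le (takeRun_snd_length c cs)

theorem runLens_nil : runLens [] = [] := by rw [runLens]

theorem runLens_cons (c : Char) (cs : List Char) :
    runLens (c :: cs) = (takeRun c cs).1 :: runLens (takeRun c cs).2 := by rw [runLens]

-- ---- A-side characterisation: the loop detects a run of length exactly 2 ----
theorem loop_eq_runLens (rest : List Char) : ∀ (c : Char) (g : Nat),
    hasSmallGroupLoop (some c) (g + 1) rest =
      ((g + (takeRun c rest).1 == 2) || (runLens (takeRun c rest).2).any (· == 2)) := by
  induction rest with
  | nil => intro c g; simp [hasSmallGroupLoop, takeRun, runLens_nil]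
  | cons d ds ih =>
    intro c g
    by_cases h : d = c
    · subst h
      simp only [hasSmallGroupLoop, beq_self_eq_true, if_true, takeRun]
      rw [ih d (g + 1),
        show g + 1 + (takeRun d ds).1 = g + ((takeRun d ds).1 + 1) by omega]
    · have hb : (d == c) = false := beq_eq_false_iff_ne.mpr h
      simp only [hasSmallGroupLoop, hb, Bool.false_eq_true, if_false]
      by_cases h2 : g + 1 = 2
      · simp [takeRun, h2, hb]
      · have hf : (g + 1 == 2) = false := by simpa using h2
        simp only [hf, Bool.false_eq_true, if_false, takeRun, hb]
        have hih := ih d 0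
        simp only [Nat.zero_add] at hih
        rw [hih, runLens_cons]
        simp

theorem a_eq_runLens (s : String) :
    has_small_group s = (runLens s.toList).any (· == 2) := by
  unfold has_small_group
  cases h : s.toList with
  | nil => simp [hasSmallGroupLoop, runLens_nil]
  | cons c cs =>
    simp only [hasSmallGroupLoop]
    have hl := loop_eq_runLens cs c 0
    simp only [Nat.zero_add] at hl
    rw [hl, runLens_cons]
    simp

-- ---- B-side machinery ----
-- consecutive 4-wide windows of a list
def win4 {α : Type} : List α → List (α × α × α × α)
  | a :: b :: c :: d :: r => (a, b, c, d) :: win4 (b :: c :: d :: r)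
  | _ => []

theorem zip4_drops_eq_win4 {α : Type} (t : List α) :
    zip4 t (t.drop 1) (t.drop 2) (t.drop 3) = win4 t := by
  induction t with
  | nil => simp [zip4, win4]
  | cons a u ih =>
    match u with
    | [] => simp [zip4, win4]
    | [b] => simp [zip4, win4]
    | [b, c] => simp [zip4, win4]
    | b :: c :: d :: r =>
      show zip4 (a :: b :: c :: d :: r) (b :: c :: d :: r) (c :: d :: r) (d :: r)
          = win4 (a :: b :: c :: d :: r)
      rw [win4, zip4]
      exact congrArg _ ih

def pvCond (q : Option Char × Option Char × Option Char × Option Char) : Bool :=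
  q.2.1 == q.2.2.1 && q.1 != q.2.1 && q.2.2.1 != q.2.2.2

-- windows of l padded with prev-context p on the left and a sentinel on the right
def anyW (p : Option Char) (l : List Char) : Bool :=
  (win4 (p :: l.map some ++ [none])).any pvCond

theorem anyW_nil (p : Option Char) : anyW p [] = false := by
  simp [anyW, win4]

-- one unfolding step of anyW
theorem anyW_cons (p : Option Char) (c : Char) (cs : List Char) :
    anyW p (c :: cs) =
      ((match cs with
        | [] => false
        | d :: ds => (c == d) && (p != some c) && (some d != ds.head?)) || anyW (some c) cs) := by
  match cs with
  | [] => simp [anyW, win4]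
  | [d] => simp [anyW, win4, pvCond]
  | d :: e :: ds => simp [anyW, win4, pvCond]

theorem anyW_run (c : Char) (cs : List Char) : anyW (some c) (c :: cs) = anyW (some c) cs := by
  rw [anyW_cons]
  match cs with
  | [] => simp
  | d :: ds => simp

theorem anyW_skipRun (c : Char) (cs : List Char) :
    anyW (some c) cs = anyW (some c) (takeRun c cs).2 := by
  induction cs with
  | nil => simp [takeRun]
  | cons d ds ih =>
    simp only [takeRun]
    by_cases h : d = c
    · subst h; simp only [beq_self_eq_true, if_true]; rw [anyW_run]; exact ih
    · simp [beq_eq_false_iff_ne.mpr h]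

theorem takeRun_fst_eq_one (c : Char) (ds : List Char) :
    ((takeRun c ds).1 == 1) = !(ds.head? == some c) := by
  cases ds with
  | nil => simp [takeRun]
  | cons e ds' =>
    simp only [takeRun]
    by_cases h : e = c
    · subst h
      simp only [beq_self_eq_true, if_true, List.head?_cons]
      have := takeRun_fst_pos e ds'
      simp
      omega
    · simp [beq_eq_false_iff_ne.mpr h]

theorem first_window_eq (c : Char) (cs : List Char) (p : Option Char) (hp : (p != some c) = true) :
    (match cs with
      | [] => false
      | d :: ds => (c == d) && (p != some c) && (some d != ds.head?)) = ((takeRun c cs).1 == 2) := by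
  cases cs with
  | nil => simp [takeRun]
  | cons d ds =>
    by_cases h : d = c
    · subst h
      simp only [takeRun, beq_self_eq_true, if_true, hp]
      have h2 : ((takeRun d ds).1 + 1 == 2) = ((takeRun d ds).1 == 1) := by
        simp
      rw [h2, takeRun_fst_eq_one]
      simp [bne, BEq.comm]
    · have hcd : (c == d) = false := beq_eq_false_iff_ne.mpr fun he => h he.symm
      simp [takeRun, beq_eq_false_iff_ne.mpr h, hcd]

-- main correspondence: the window test equals the run-length test
theorem anyW_eq_runLens : ∀ (n : Nat) (l : List Char) (p : Option Char), l.length ≤ n →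
    (∀ c cs, l = c :: cs → (p != some c) = true) →
    anyW p l = (runLens l).any (· == 2) := by
  intro n
  induction n with
  | zero =>
    intro l p hl _
    have : l = [] := List.eq_nil_of_length_eq_zero (Nat.le_zero.mp hl)
    subst this; simp [anyW_nil, runLens_nil]
  | succ n ih =>
    intro l p hl hp
    cases l with
    | nil => simp [anyW_nil, runLens_nil]
    | cons c cs =>
      rw [anyW_cons, first_window_eq c cs p (hp c cs rfl), anyW_skipRun,
        ih (takeRun c cs).2 (some c)
          (le_trans (takeRun_snd_length c cs) (by simpa using Nat.lt_succ_iff.mp (by simpa using hl)))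
          (by
            intro c' cs' he
            have := takeRun_snd_head c cs
            rw [he] at this
            simp only [List.head?_cons, ne_eq, Option.some.injEq] at this
            simpa [bne] using fun h => this h.symm),
        runLens_cons]
      simp

theorem b_eq_runLens (s : String) :
    has_small_group_alt s = (runLens s.toList).any (· == 2) := by
  unfold has_small_group_alt
  have hs : ∀ (k : Nat) (t : List (Option Char)),
      PySem.List.slice t (some (k : Int)) none = t.drop k :=
    fun k t => PySem.List.slice_from_natCast t k
  rw [show (1 : Int) = ((1 : Nat) : Int) by norm_num, hs,
    show (2 : Int) = ((2 : Nat) : Int) by norm_num, hs,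
    show (3 : Int) = ((3 : Nat) : Int) by norm_num, hs,
    zip4_drops_eq_win4]
  have h : (win4 (padded s)).any
      (fun q => q.2.1 == q.2.2.1 && q.1 != q.2.1 && q.2.2.1 != q.2.2.2)
      = anyW none s.toList := by
    unfold anyW pvCond padded
    rfl
  rw [h]
  exact anyW_eq_runLens s.toList.length s.toList none le_rfl (by intro c cs _; simp)

-- ===== VERDICT (by name: the statement is the Claim_ definition above) =====
theorem has_small_group_spec : Claim_equal_has_small_group := by
  intro s _
  unfold Spec_has_small_group
  rw [a_eq_runLens, b_eq_runLens]
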